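-- pv_equiv track=rewrite | github.com/pypi-data/pypi-mirror-402 | packages/aisentry/aisentry-1.0.0-py3-none-any.whl/aisentry/scorers/governance_scorer.py | _score_plugin_security_comprehensive
-- ===== SOURCE A (Python) =====
-- from typing import Any, Dict, List
--
-- def _score_plugin_security_comprehensive(parsed_data: Dict[str, Any]) -> int:
--     """
--     Score comprehensive plugin security controls - Evidence-Based
--
--     Uses AST-based function detection for plugin security.
--     Plugin security controls third-party integrations safely.
--
--     Scoring tiers:
--     - 100: Validation + sandboxing/auth + permissions
--     - 75: Validation + permissions
--     - 60: Validation only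
--     - 0: None detected
--     """
--     # Plugin security is primarily about security functions
--     functions = parsed_data.get('functions', [])
--     function_names = [f['name'].lower() for f in functions]
--
--     # Plugin validation functions
--     validation_patterns = [
--         'validate_plugin', 'verify_plugin', 'check_plugin', 'plugin_validation',
--         'validate_extension', 'verify_extension'
--     ]
--     has_validation = any(
--         any(pattern in func for pattern in validation_patterns)
--         for func in function_names
--     )
--
--     # Plugin sandboxing functions
--     sandboxing_patterns = [
--         'sandbox_plugin', 'isolate_plugin', 'containerize_plugin',
--         'plugin_sandbox', 'plugin_isolation'
--     ]
--     has_sandboxing = any(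
--         any(pattern in func for pattern in sandboxing_patterns)
--         for func in function_names
--     )
--
--     # Plugin authentication functions
--     auth_patterns = [
--         'authenticate_plugin', 'plugin_auth', 'verify_plugin_signature',
--         'check_plugin_signature', 'plugin_verification'
--     ]
--     has_auth = any(
--         any(pattern in func for pattern in auth_patterns)
--         for func in function_names
--     )
--
--     # Plugin permission functions
--     permission_patterns = [
--         'plugin_permissions', 'check_plugin_permission', 'plugin_access_control',
--         'grant_plugin_permission', 'plugin_capabilities'
--     ]
--     has_permissions = any(
--         any(pattern in func for pattern in permission_patterns)
--         for func in function_names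
--     )
--
--     # Scoring logic
--     if has_validation and (has_sandboxing or has_auth) and has_permissions:
--         return 100
--     elif has_validation and has_permissions:
--         return 75
--     elif has_validation:
--         return 60
--     else:
--         return 0
-- ===== SOURCE B (Python) =====
-- _GROUPS = [
--     ['validate_plugin', 'verify_plugin', 'check_plugin', 'plugin_validation',
--      'validate_extension', 'verify_extension'],
--     ['sandbox_plugin', 'isolate_plugin', 'containerize_plugin',
--      'plugin_sandbox', 'plugin_isolation'],
--     ['authenticate_plugin', 'plugin_auth', 'verify_plugin_signature',
--      'check_plugin_signature', 'plugin_verification'],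
--     ['plugin_permissions', 'check_plugin_permission', 'plugin_access_control',
--      'grant_plugin_permission', 'plugin_capabilities'],
-- ]
--
-- def _score_plugin_security_comprehensive(parsed_data):
--     flags = [False, False, False, False]
--     for f in parsed_data.get('functions', []):
--         name = f['name'].lower()
--         for i, pats in enumerate(_GROUPS):
--             if not flags[i] and any(p in name for p in pats):
--                 flags[i] = True
--         if all(flags):
--             break
--     has_validation, has_sandboxing, has_auth, has_permissions = flags
--     if has_validation and (has_sandboxing or has_auth) and has_permissions:
--         return 100
--     if has_validation and has_permissions:
--         return 75
--     if has_validation: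
--         return 60
--     return 0
-- ===== Notes on version B (the rewrite author's own statement) =====
-- stated objective: alternative
-- what changed: Replaces A's four separate full scans of the function-name list (one per pattern group) with a single pass that maintains four boolean flags and breaks early once all four are set; the tiered 100/75/60/0 scoring is unchanged.
import Mathlib
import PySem

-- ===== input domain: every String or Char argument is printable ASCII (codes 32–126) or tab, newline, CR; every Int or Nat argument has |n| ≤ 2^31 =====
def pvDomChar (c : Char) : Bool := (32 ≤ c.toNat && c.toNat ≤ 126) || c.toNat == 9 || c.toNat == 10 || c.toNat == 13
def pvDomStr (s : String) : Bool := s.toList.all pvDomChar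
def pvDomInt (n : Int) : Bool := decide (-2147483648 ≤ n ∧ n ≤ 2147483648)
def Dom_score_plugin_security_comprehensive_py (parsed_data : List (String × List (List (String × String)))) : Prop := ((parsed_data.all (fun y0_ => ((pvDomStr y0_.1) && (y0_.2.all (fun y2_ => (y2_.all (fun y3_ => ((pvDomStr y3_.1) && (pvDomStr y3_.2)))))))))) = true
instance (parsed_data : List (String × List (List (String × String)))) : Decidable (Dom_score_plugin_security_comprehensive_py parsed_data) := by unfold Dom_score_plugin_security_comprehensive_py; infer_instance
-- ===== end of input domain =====

-- B replaces A's four separate full scans of the function names (one per pattern group) with a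
-- single pass maintaining four flags (early exit once all are set); same tiered scoring (alternative).


-- pattern groups (module constants shared by both programs)
def pvValPats : List String :=
  ["validate_plugin", "verify_plugin", "check_plugin", "plugin_validation",
   "validate_extension", "verify_extension"]
def pvSbPats : List String :=
  ["sandbox_plugin", "isolate_plugin", "containerize_plugin",
   "plugin_sandbox", "plugin_isolation"]
def pvAuthPats : List String :=
  ["authenticate_plugin", "plugin_auth", "verify_plugin_signature",
   "check_plugin_signature", "plugin_verification"]
def pvPermPats : List String :=
  ["plugin_permissions", "check_plugin_permission", "plugin_access_control",
   "grant_plugin_permission", "plugin_capabilities"]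

-- ===== PORT A =====
-- f['name'] raises KeyError when the key is absent; Pre_ excludes exactly those inputs,
-- so the "" default of getD is never taken on admitted inputs.
def score_plugin_security_comprehensive_py (parsed_data : List (String × List (List (String × String)))) : Int :=
  let functions := (PySem.Dict.mk parsed_data).getD "functions" []
  let function_names := functions.map (fun f => PySem.Str.lower ((PySem.Dict.mk f).getD "name" ""))
  let has_validation := function_names.any (fun func => pvValPats.any (fun pat => PySem.Str.isIn pat func))
  let has_sandboxing := function_names.any (fun func => pvSbPats.any (fun pat => PySem.Str.isIn pat func))
  let has_auth := function_names.any (fun func => pvAuthPats.any (fun pat => PySem.Str.isIn pat func))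
  let has_permissions := function_names.any (fun func => pvPermPats.any (fun pat => PySem.Str.isIn pat func))
  if has_validation && (has_sandboxing || has_auth) && has_permissions then 100
  else if has_validation && has_permissions then 75
  else if has_validation then 60
  else 0

-- ===== PORT B =====
def pvMatch (pats : List String) (name : String) : Bool :=
  pats.any (fun p => PySem.Str.isIn p name)

-- single pass over the function dicts, OR-ing into the four flags, early exit when all set
def pvScan : List (List (String × String)) → Bool → Bool → Bool → Bool → Bool × Bool × Bool × Bool
  | [], v, s, a, p => (v, s, a, p)
  | f :: rest, v, s, a, p =>
    let name := PySem.Str.lower ((PySem.Dict.mk f).getD "name" "")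
    let v' := v || pvMatch pvValPats name
    let s' := s || pvMatch pvSbPats name
    let a' := a || pvMatch pvAuthPats name
    let p' := p || pvMatch pvPermPats name
    if v' && s' && a' && p' then (v', s', a', p')
    else pvScan rest v' s' a' p'

def score_plugin_security_comprehensive_py_alt (parsed_data : List (String × List (List (String × String)))) : Int :=
  let functions := (PySem.Dict.mk parsed_data).getD "functions" []
  match pvScan functions false false false false with
  | (v, s, a, p) =>
    if v && (s || a) && p then 100
    else if v && p then 75
    else if v then 60
    else 0

-- ===== PRECONDITION & SPEC =====
-- Pre_ excludes exactly the inputs where Python A raises KeyError: a function dict without a 'name' key.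
def Pre_score_plugin_security_comprehensive_py (parsed_data : List (String × List (List (String × String)))) : Prop :=
  (((PySem.Dict.mk parsed_data).getD "functions" []).all
    (fun f => (PySem.Dict.mk f).contains "name")) = true
instance (parsed_data : List (String × List (List (String × String)))) : Decidable (Pre_score_plugin_security_comprehensive_py parsed_data) := by unfold Pre_score_plugin_security_comprehensive_py; infer_instance

def pvWitness_score_plugin_security_comprehensive_py : (List (String × List (List (String × String)))) :=
  [("functions", [[("name", "Validate_Plugin")], [("name", "plugin_permissions")]])]

def Spec_score_plugin_security_comprehensive_py (parsed_data : List (String × List (List (String × String)))) (out : Int) : Prop := out = score_plugin_security_comprehensive_py_alt parsed_data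
instance (parsed_data : List (String × List (List (String × String)))) (out : Int) : Decidable (Spec_score_plugin_security_comprehensive_py parsed_data out) := by unfold Spec_score_plugin_security_comprehensive_py; infer_instance

-- ===== CLAIM (what is proved, stated in full; the proofs are below) =====
def Claim_equal_score_plugin_security_comprehensive_py : Prop := ∀ (parsed_data : List (String × List (List (String × String)))), Dom_score_plugin_security_comprehensive_py parsed_data → Pre_score_plugin_security_comprehensive_py parsed_data → Spec_score_plugin_security_comprehensive_py parsed_data (score_plugin_security_comprehensive_py parsed_data)

-- ===== LEMMAS AND PROOFS =====

-- the single-pass scan computes exactly the four independent `any` scans OR-ed onto the seeds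
theorem pvScan_eq (fs : List (List (String × String))) (v s a p : Bool) :
    pvScan fs v s a p =
      (v || fs.any (fun f => pvMatch pvValPats (PySem.Str.lower ((PySem.Dict.mk f).getD "name" ""))),
       s || fs.any (fun f => pvMatch pvSbPats (PySem.Str.lower ((PySem.Dict.mk f).getD "name" ""))),
       a || fs.any (fun f => pvMatch pvAuthPats (PySem.Str.lower ((PySem.Dict.mk f).getD "name" ""))),
       p || fs.any (fun f => pvMatch pvPermPats (PySem.Str.lower ((PySem.Dict.mk f).getD "name" "")))) := by
  induction fs generalizing v s a p with
  | nil => simp [pvScan]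
  | cons f rest ih =>
    simp only [pvScan, List.any_cons]
    split
    · rename_i h
      simp only [Bool.and_eq_true] at h
      obtain ⟨⟨⟨hv, hs⟩, ha⟩, hp⟩ := h
      simp [← Bool.or_assoc, hv, hs, ha, hp]
    · rw [ih]
      simp [Bool.or_assoc]

theorem score_plugin_security_comprehensive_py_eq (parsed_data : List (String × List (List (String × String)))) :
    score_plugin_security_comprehensive_py parsed_data =
      score_plugin_security_comprehensive_py_alt parsed_data := by
  simp only [score_plugin_security_comprehensive_py, score_plugin_security_comprehensive_py_alt,
    pvScan_eq, Bool.false_or, List.any_map, Function.comp_def, pvMatch]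

-- ===== VERDICT (by name: the statement is the Claim_ definition above) =====
theorem score_plugin_security_comprehensive_py_spec : Claim_equal_score_plugin_security_comprehensive_py := by
  intro parsed_data _ _
  unfold Spec_score_plugin_security_comprehensive_py
  exact score_plugin_security_comprehensive_py_eq parsed_data
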